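-- pv_equiv track=rewrite | github.com/YeoJiSu/Programming | gold/2247.py | SOD
-- ===== SOURCE A (Python) =====
-- import math
--
-- def SOD(n):
--     if n ==1:
--         return 0
--     my_SOD = []
--     for i in range(2,int(math.sqrt(n))+1):
--         if n%i == 0:
--             my_SOD.append(i)
--             my_SOD.append(n//i)
--     my_SOD = set(my_SOD) # set을 이용해 중복제거
--     return sum(list(my_SOD))
-- ===== SOURCE B (Python) =====
-- def SOD(n):
--     # sum of divisors of n excluding 1 and n, via the multiplicative
--     # formula: factor n, sigma(n) = prod sigma(p^e), answer sigma(n) - n - 1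
--     if n < 2:
--         return 0
--     sigma = 1
--     m = n
--     p = 2
--     while p * p <= m:
--         if m % p == 0:
--             term = 1
--             while m % p == 0:
--                 m //= p
--                 term = term * p + 1
--             sigma *= term
--         p += 1
--     if m > 1:
--         sigma *= m + 1
--     return sigma - n - 1
-- ===== Notes on version B (the rewrite author's own statement) =====
-- stated objective: alternative
-- what changed: B computes sigma(n) by trial-division prime factorization and the multiplicative formula (product of sigma(p^e) terms built by Horner accumulation) and returns sigma(n)-n-1, instead of A's enumeration of divisor pairs up to sqrt(n) deduplicated through a set and summed.
-- crash fix: On negative n, A raises ValueError via math.sqrt while B's guard for arguments without proper divisors returns 0. — e.g. on SOD(-5): A raises ValueError, B returns 0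
import Mathlib
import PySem

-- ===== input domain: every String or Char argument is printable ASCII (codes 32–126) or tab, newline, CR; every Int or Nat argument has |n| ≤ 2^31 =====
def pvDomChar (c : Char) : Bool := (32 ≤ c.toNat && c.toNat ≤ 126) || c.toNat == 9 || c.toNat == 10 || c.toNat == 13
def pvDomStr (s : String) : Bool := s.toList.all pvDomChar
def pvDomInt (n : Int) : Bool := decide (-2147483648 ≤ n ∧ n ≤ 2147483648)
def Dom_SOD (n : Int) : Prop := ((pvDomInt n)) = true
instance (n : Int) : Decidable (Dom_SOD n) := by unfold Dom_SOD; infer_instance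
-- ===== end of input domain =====

-- B computes sigma(n) by trial-division prime factorization (multiplicative formula)
-- and returns sigma(n) - n - 1, instead of A's divisor-pair collection + set + sum
-- (alternative algorithm).

-- ===== PORT A =====
-- int(math.sqrt(n)) is ported as Nat.sqrt n.toNat: exact for 0 ≤ n ≤ 2^31 (double sqrt is
-- correctly rounded and 1/(2·sqrt n) far exceeds the ulp there); n < 0 raises, excluded by Pre_.
def SOD (n : Int) : Int :=
  if n = 1 then 0
  else
    -- sum(list(set(my_SOD))): Python's set iteration order is not modelled, but sum is order-independent
    (PySem.Set.ofList
      ((PySem.List.pyRange 2 (((Nat.sqrt n.toNat : Nat) : Int) + 1) 1).foldl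
        (fun acc i => if PySem.Int.mod n i = 0
                      then acc ++ [i, PySem.Int.floordiv n i] else acc) [])).sum

-- ===== PORT B =====
-- Source B's inner 'while m % p == 0: m //= p; term = term * p + 1', on state (m, term).
-- The conjuncts 2 ≤ p, 1 ≤ m only make the recursion total; they hold on every reachable state.
-- termination facts for the two loops (cited by name in decreasing_by,
-- keeping the definitions' proof terms small)
theorem sodInner_dec (p m : Int) (h : PySem.Int.mod m p = 0 ∧ 2 ≤ p ∧ 1 ≤ m) :
    (PySem.Int.floordiv m p).toNat < m.toNat := by
  obtain ⟨hmod, hp, hm⟩ := h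
  obtain ⟨q, hq⟩ := (PySem.Int.mod_eq_zero_iff_dvd m p).mp hmod
  have hfd : PySem.Int.floordiv m p = q := by
    rw [PySem.Int.floordiv_eq_ediv_of_pos (by omega : (0:Int) < p), hq,
      Int.mul_ediv_cancel_left _ (by omega)]
  have hq1 : 1 ≤ q := by nlinarith
  have : q < m := by nlinarith
  rw [hfd]; omega

-- Source B's inner 'while m % p == 0: m //= p; term = term * p + 1', on state (m, term).
-- The conjuncts 2 ≤ p, 1 ≤ m only make the recursion total; they hold on every reachable state.
def sodInner (p m term : Int) : Int × Int :=
  if h : PySem.Int.mod m p = 0 ∧ 2 ≤ p ∧ 1 ≤ m then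
    sodInner p (PySem.Int.floordiv m p) (term * p + 1)
  else (m, term)
termination_by m.toNat
decreasing_by exact sodInner_dec p m h

-- the inner loop never drops m below 1 nor raises it (cited by sodOuter's termination proof)
theorem sodInner_fst (p : Int) (hp : 2 ≤ p) :
    ∀ m t, 1 ≤ m → 1 ≤ (sodInner p m t).1 ∧ (sodInner p m t).1 ≤ m := by
  intro m
  induction hk : m.toNat using Nat.strong_induction_on generalizing m with
  | _ k ih =>
    intro t hm
    rw [sodInner]
    by_cases h : PySem.Int.mod m p = 0 ∧ 2 ≤ p ∧ 1 ≤ m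
    · rw [dif_pos h]
      obtain ⟨q, hq⟩ := (PySem.Int.mod_eq_zero_iff_dvd m p).mp h.1
      have hfd : PySem.Int.floordiv m p = q := by
        rw [PySem.Int.floordiv_eq_ediv_of_pos (by omega : (0:Int) < p), hq,
          Int.mul_ediv_cancel_left _ (by omega)]
      have hq1 : 1 ≤ q := by nlinarith
      have hlt : q < m := by nlinarith
      have := ih q.toNat (by omega) q rfl (t * p + 1) hq1
      rw [hfd]
      exact ⟨this.1, le_trans this.2 (by omega)⟩
    · rw [dif_neg h]
      exact ⟨hm, le_refl m⟩

theorem sodOuter_dec1 (m p : Int) (h : 2 ≤ p ∧ p * p ≤ m) :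
    ((sodInner p m 1).1 + 1 - (p + 1)).toNat < (m + 1 - p).toNat := by
  obtain ⟨hp, hpm⟩ := h
  have hm1 : 1 ≤ m := by nlinarith
  have hpm' : p ≤ m := by nlinarith
  have := sodInner_fst p hp m 1 hm1
  omega

theorem sodOuter_dec2 (m p : Int) (h : 2 ≤ p ∧ p * p ≤ m) :
    (m + 1 - (p + 1)).toNat < (m + 1 - p).toNat := by
  obtain ⟨hp, hpm⟩ := h
  have hpm' : p ≤ m := by nlinarith
  omega

-- Source B's outer 'while p * p <= m' loop on state (m, p, sigma), followed by the final
-- 'if m > 1: sigma *= m + 1'.  The conjunct 2 ≤ p only makes the recursion total.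
def sodOuter (m p sigma : Int) : Int :=
  if h : 2 ≤ p ∧ p * p ≤ m then
    if PySem.Int.mod m p = 0 then
      sodOuter (sodInner p m 1).1 (p + 1) (sigma * (sodInner p m 1).2)
    else sodOuter m (p + 1) sigma
  else
    if 1 < m then sigma * (m + 1) else sigma
termination_by (m + 1 - p).toNat
decreasing_by
  · exact sodOuter_dec1 m p h
  · exact sodOuter_dec2 m p h

def SOD_alt (n : Int) : Int :=
  if n < 2 then 0
  else sodOuter n 2 1 - n - 1

-- ===== PRECONDITION & SPEC =====
-- Pre_ excludes negative n, on which A raises ValueError (math.sqrt of a negative number).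
def Pre_SOD (n : Int) : Prop := 0 ≤ n
instance (n : Int) : Decidable (Pre_SOD n) := by unfold Pre_SOD; infer_instance
def pvWitness_SOD : Int := 12

-- On negative n, A raises ValueError via math.sqrt while B's guard for arguments without proper divisors returns 0.
def Raises_SOD (n : Int) : Prop := n < 0
instance (n : Int) : Decidable (Raises_SOD n) := by unfold Raises_SOD; infer_instance
def pvRaiseWitness_SOD : Int := -5
def pvRaiseWitnessOut_SOD : Int := 0

def Spec_SOD (n : Int) (out : Int) : Prop := out = SOD_alt n
instance (n : Int) (out : Int) : Decidable (Spec_SOD n out) := by unfold Spec_SOD; infer_instance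

-- ===== CLAIM (what is proved, stated in full; the proofs are below) =====
def Claim_equal_SOD : Prop := ∀ (n : Int), Dom_SOD n → Pre_SOD n → Spec_SOD n (SOD n)
def Claim_raises_SOD : Prop := (∀ (n : Int), Dom_SOD n → Raises_SOD n → ¬ Pre_SOD n) ∧ (Dom_SOD (pvRaiseWitness_SOD) ∧ Raises_SOD (pvRaiseWitness_SOD) ∧ SOD_alt (pvRaiseWitness_SOD) = pvRaiseWitnessOut_SOD)

-- ===== LEMMAS AND PROOFS =====

-- i ≤ isqrt n ↔ i*i ≤ n, the bridge between A's loop bound and divisor size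
theorem le_sqrt_int (n i : Int) (hn : 0 ≤ n) (hi : 0 ≤ i) :
    i ≤ ((Nat.sqrt n.toNat : Nat) : Int) ↔ i * i ≤ n := by
  lift n to Nat using hn
  lift i to Nat using hi
  rw [Int.toNat_natCast]
  constructor
  · intro h
    have := Nat.le_sqrt.mp (by exact_mod_cast h)
    exact_mod_cast this
  · intro h
    have : i * i ≤ n := by exact_mod_cast h
    exact_mod_cast Nat.le_sqrt.mpr this

-- A's pair list holds exactly the divisors d of n with 2 ≤ d < n
theorem memA (n d : Int) (hn : 0 ≤ n) :
    d ∈ (PySem.List.pyRange 2 (((Nat.sqrt n.toNat : Nat) : Int) + 1) 1).foldl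
        (fun acc i => if PySem.Int.mod n i = 0
                      then acc ++ [i, PySem.Int.floordiv n i] else acc) ([] : List Int) ↔
      2 ≤ d ∧ d < n ∧ d ∣ n := by
  rw [PySem.List.foldl_ite_eq_foldl_filter, PySem.List.foldl_append_eq_flatMap]
  simp only [List.nil_append, List.mem_flatMap, List.mem_filter,
    PySem.List.mem_pyRange_one, List.mem_cons, decide_eq_true_eq,
    List.not_mem_nil, or_false, PySem.Int.mod_eq_zero_iff_dvd]
  constructor
  · rintro ⟨i, ⟨⟨h2i, hilt⟩, hdvd⟩, hd⟩
    have hii : i * i ≤ n := (le_sqrt_int n i hn (by omega)).mp (by omega)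
    obtain ⟨q, hq⟩ := hdvd
    have hfd : PySem.Int.floordiv n i = q := by
      rw [PySem.Int.floordiv_eq_ediv_of_pos (by omega : (0:Int) < i), hq,
        Int.mul_ediv_cancel_left _ (by omega)]
    have hiq : i ≤ q := by nlinarith
    rcases hd with hd | hd
    · subst hd
      exact ⟨h2i, by nlinarith, ⟨q, hq⟩⟩
    · rw [hfd] at hd
      subst hd
      exact ⟨by omega, by nlinarith, ⟨i, by linarith [hq, mul_comm i d]⟩⟩
  · rintro ⟨h2d, hdn, ⟨q, hq⟩⟩
    have hq2 : 2 ≤ q := by nlinarith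
    by_cases hdd : d * d ≤ n
    · refine ⟨d, ⟨⟨h2d, ?_⟩, ⟨q, hq⟩⟩, Or.inl rfl⟩
      have := (le_sqrt_int n d hn (by omega)).mpr hdd
      omega
    · refine ⟨q, ⟨⟨hq2, ?_⟩, ⟨d, by rw [hq]; ring⟩⟩, Or.inr ?_⟩
      · have hqd : q < d := by nlinarith
        have : q * q ≤ n := by nlinarith
        have := (le_sqrt_int n q hn (by omega)).mpr this
        omega
      · rw [PySem.Int.floordiv_eq_ediv_of_pos (by omega : (0:Int) < q),
          show n = q * d by rw [hq]; ring, Int.mul_ediv_cancel_left _ (by omega)]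

-- A's value for n ≥ 2 is sigma(n) - 1 - n
theorem SOD_A_val (n : Int) (hn : 2 ≤ n) :
    SOD n = ((ArithmeticFunction.sigma 1 n.toNat : ℕ) : ℤ) - 1 - n := by
  unfold SOD
  rw [if_neg (by omega)]
  set L := PySem.Set.ofList
      ((PySem.List.pyRange 2 (((Nat.sqrt n.toNat : Nat) : Int) + 1) 1).foldl
        (fun acc i => if PySem.Int.mod n i = 0
                      then acc ++ [i, PySem.Int.floordiv n i] else acc) []) with hL
  have hmem : ∀ d, d ∈ L ↔ 2 ≤ d ∧ d < n ∧ d ∣ n := by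
    intro d
    rw [hL, PySem.Set.mem_ofList]
    exact memA n d (by omega)
  have hsum : L.sum = L.toFinset.sum id := by
    rw [List.sum_toFinset _ (PySem.Set.nodup_ofList _), List.map_id]
  have hset : L.toFinset =
      ((n.toNat.divisors.image (Nat.cast : ℕ → ℤ)).erase 1).erase n := by
    ext x
    simp only [List.mem_toFinset, hmem, Finset.mem_erase, Finset.mem_image,
      Nat.mem_divisors]
    constructor
    · rintro ⟨h2, hlt, hdvd⟩
      refine ⟨by omega, by omega, x.toNat, ⟨?_, by omega⟩, by omega⟩
      have hx : x = ((x.toNat : ℕ) : ℤ) := by omega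
      have hn' : n = ((n.toNat : ℕ) : ℤ) := by omega
      rw [hx, hn', Int.natCast_dvd_natCast] at hdvd
      exact hdvd
    · rintro ⟨hxn, hx1, d, ⟨hdvd, hn0⟩, hdx⟩
      have hd1 : 1 ≤ d := Nat.one_le_iff_ne_zero.mpr (by rintro rfl; simp at hdvd; omega)
      have hdle : d ≤ n.toNat := Nat.le_of_dvd (by omega) hdvd
      have hdvd' : x ∣ n := by
        rw [← hdx, show n = ((n.toNat : ℕ) : ℤ) by omega, Int.natCast_dvd_natCast]
        exact hdvd
      refine ⟨?_, ?_, hdvd'⟩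
      · omega
      · omega
  have h1mem : (1 : ℤ) ∈ n.toNat.divisors.image (Nat.cast : ℕ → ℤ) := by
    simp only [Finset.mem_image]
    exact ⟨1, Nat.one_mem_divisors.mpr (by omega), by norm_num⟩
  have hnmem : (n : ℤ) ∈ (n.toNat.divisors.image (Nat.cast : ℕ → ℤ)).erase 1 := by
    refine Finset.mem_erase.mpr ⟨by omega, ?_⟩
    simp only [Finset.mem_image]
    exact ⟨n.toNat, Nat.mem_divisors_self _ (by omega), by omega⟩
  rw [hsum, hset, Finset.sum_erase_eq_sub hnmem, Finset.sum_erase_eq_sub h1mem,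
    Finset.sum_image (by intro a _ b _ h; exact_mod_cast h)]
  simp only [id_eq]
  have : ∑ d ∈ n.toNat.divisors, (d : ℤ) = ((ArithmeticFunction.sigma 1 n.toNat : ℕ) : ℤ) := by
    rw [ArithmeticFunction.sigma_one_apply]
    push_cast
    rfl
  rw [this]

-- a ∣ b over Int of nonnegatives is divisibility of the toNats
theorem int_dvd_iff_toNat (a b : Int) (ha : 0 ≤ a) (hb : 0 ≤ b) :
    a ∣ b ↔ a.toNat ∣ b.toNat := by
  rw [← Int.natCast_dvd_natCast, Int.toNat_of_nonneg ha, Int.toNat_of_nonneg hb]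

-- the inner loop extracts the full power of p: m = p^e * m', p ∤ m', and
-- term accumulates t * p^e + (p^(e-1) + … + 1) (Horner)
theorem sodInner_spec (p : Int) (hp : 2 ≤ p) :
    ∀ m, 1 ≤ m → ∀ t, ∃ e : ℕ,
      m = p ^ e * (sodInner p m t).1 ∧ ¬ p ∣ (sodInner p m t).1 ∧
      (sodInner p m t).2 = t * p ^ e + ∑ i ∈ Finset.range e, p ^ i := by
  intro m
  induction hk : m.toNat using Nat.strong_induction_on generalizing m with
  | _ k ih =>
    intro hm t
    rw [sodInner]
    by_cases h : PySem.Int.mod m p = 0 ∧ 2 ≤ p ∧ 1 ≤ m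
    · rw [dif_pos h]
      obtain ⟨q, hq⟩ := (PySem.Int.mod_eq_zero_iff_dvd m p).mp h.1
      have hfd : PySem.Int.floordiv m p = q := by
        rw [PySem.Int.floordiv_eq_ediv_of_pos (by omega : (0:Int) < p), hq,
          Int.mul_ediv_cancel_left _ (by omega)]
      have hq1 : 1 ≤ q := by nlinarith
      have hlt : q < m := by nlinarith
      obtain ⟨e, he1, he2, he3⟩ := ih q.toNat (by omega) q rfl hq1 (t * p + 1)
      rw [hfd]
      set r := sodInner p q (t * p + 1) with hr
      refine ⟨e + 1, ?_, he2, ?_⟩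
      · calc m = p * q := hq
          _ = p * (p ^ e * r.1) := by rw [← he1]
          _ = p ^ (e + 1) * r.1 := by ring
      · rw [he3, Finset.sum_range_succ]
        ring
    · rw [dif_neg h]
      have hmod : ¬ PySem.Int.mod m p = 0 := by tauto
      refine ⟨0, by simp, ?_, by simp⟩
      intro hdvd
      exact hmod ((PySem.Int.mod_eq_zero_iff_dvd m p).mpr hdvd)

-- the outer loop: if m has no divisor in [2, p), sodOuter m p s = s * sigma(m)
theorem sodOuter_spec :
    ∀ k : ℕ, ∀ m p sigma : Int, (m + 1 - p).toNat = k → 1 ≤ m → 2 ≤ p →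
      (∀ d : Int, 2 ≤ d → d < p → ¬ d ∣ m) →
      sodOuter m p sigma = sigma * ((ArithmeticFunction.sigma 1 m.toNat : ℕ) : ℤ) := by
  intro k
  induction k using Nat.strong_induction_on with
  | _ k ih =>
    intro m p sigma hk hm hp hnd
    rw [sodOuter]
    by_cases hg : 2 ≤ p ∧ p * p ≤ m
    · rw [dif_pos hg]
      have hpm : p ≤ m := by nlinarith [hg.2]
      by_cases hmod : PySem.Int.mod m p = 0
      · rw [if_pos hmod]
        have hpdvd : p ∣ m := (PySem.Int.mod_eq_zero_iff_dvd m p).mp hmod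
        -- p is prime: any proper factor of p would be a divisor of m below p
        have hpprime : p.toNat.Prime := by
          by_contra hnp
          obtain ⟨d, hddvd, hd2, hdlt⟩ :=
            Nat.exists_dvd_of_not_prime2 (by omega : 2 ≤ p.toNat) hnp
          refine hnd (d : ℤ) (by omega) (by omega) (dvd_trans ?_ hpdvd)
          rw [int_dvd_iff_toNat _ _ (by omega) (by omega), Int.toNat_natCast]
          exact hddvd
        obtain ⟨e, he1, he2, he3⟩ := sodInner_spec p hg.1 m hm 1
        set r := sodInner p m 1 with hr
        have hr1 : 1 ≤ r.1 ∧ r.1 ≤ m := sodInner_fst p hg.1 m 1 hm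
        have hre : r.1 ∣ m := Dvd.intro_left _ he1.symm
        have hnd' : ∀ d : Int, 2 ≤ d → d < p + 1 → ¬ d ∣ r.1 := by
          intro d hd2 hdp hddvd
          by_cases hdpeq : d = p
          · exact he2 (hdpeq ▸ hddvd)
          · exact hnd d hd2 (by omega) (dvd_trans hddvd hre)
        have ihv := ih (r.1 + 1 - (p + 1)).toNat (by omega) r.1 (p + 1) (sigma * r.2)
          rfl hr1.1 (by omega) hnd'
        rw [ihv]
        have hmnat : m.toNat = p.toNat ^ e * r.1.toNat := by
          have h' : ((m.toNat : ℕ) : ℤ) = ((p.toNat ^ e * r.1.toNat : ℕ) : ℤ) := by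
            push_cast
            rw [Int.toNat_of_nonneg (by omega : (0:ℤ) ≤ p),
              Int.toNat_of_nonneg (by omega : (0:ℤ) ≤ r.1),
              Int.toNat_of_nonneg (by omega : (0:ℤ) ≤ m)]
            exact he1
          exact_mod_cast h'
        have hcop : Nat.Coprime (p.toNat ^ e) r.1.toNat := by
          refine Nat.Coprime.pow_left e ?_
          refine (Nat.Prime.coprime_iff_not_dvd hpprime).mpr ?_
          intro hc
          exact he2 ((int_dvd_iff_toNat p r.1 (by omega) (by omega)).mpr hc)
        have hmul : (ArithmeticFunction.sigma 1 m.toNat : ℕ) =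
            (ArithmeticFunction.sigma 1 (p.toNat ^ e) : ℕ) *
            (ArithmeticFunction.sigma 1 r.1.toNat : ℕ) := by
          rw [hmnat]
          exact ArithmeticFunction.isMultiplicative_sigma.map_mul_of_coprime hcop
        have hterm : r.2 = ((ArithmeticFunction.sigma 1 (p.toNat ^ e) : ℕ) : ℤ) := by
          rw [he3, ArithmeticFunction.sigma_one_apply_prime_pow hpprime]
          push_cast
          rw [Finset.sum_range_succ, Int.toNat_of_nonneg (by omega : (0:ℤ) ≤ p)]
          ring
        rw [hterm, hmul]
        push_cast
        ring
      · rw [if_neg hmod]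
        have hnd' : ∀ d : Int, 2 ≤ d → d < p + 1 → ¬ d ∣ m := by
          intro d hd2 hdp hddvd
          by_cases hdpeq : d = p
          · exact hmod ((PySem.Int.mod_eq_zero_iff_dvd m p).mpr (hdpeq ▸ hddvd))
          · exact hnd d hd2 (by omega) hddvd
        exact ih (m + 1 - (p + 1)).toNat (by omega) m (p + 1) sigma rfl hm (by omega) hnd'
    · rw [dif_neg hg]
      have hpp : m < p * p := by
        rcases not_and_or.mp hg with h | h
        · omega
        · omega
      by_cases hm1 : m = 1
      · subst hm1
        rw [if_neg (by omega)]
        simp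
      · rw [if_pos (by omega)]
        -- m has no divisor d with 2 ≤ d ≤ sqrt m < p, so m is prime
        have hprime : m.toNat.Prime := by
          rw [Nat.prime_def_le_sqrt]
          refine ⟨by omega, ?_⟩
          intro d hd2 hdle hddvd
          have hdd : d * d ≤ m.toNat := le_trans (Nat.mul_le_mul hdle hdle)
            (Nat.sqrt_le m.toNat)
          have hddz : (d : ℤ) * (d : ℤ) ≤ m := by
            have h' : ((d * d : ℕ) : ℤ) ≤ ((m.toNat : ℕ) : ℤ) := by exact_mod_cast hdd
            push_cast at h'
            omega
          have hdltp : (d : ℤ) < p := by nlinarith [hpp, hddz]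
          refine hnd (d : ℤ) (by omega) hdltp ?_
          rw [int_dvd_iff_toNat _ _ (by omega) (by omega), Int.toNat_natCast]
          exact hddvd
        have hsig : (ArithmeticFunction.sigma 1 m.toNat : ℕ) = m.toNat + 1 := by
          rw [ArithmeticFunction.sigma_one_apply, Nat.Prime.divisors hprime,
            Finset.sum_pair (by omega : (1 : ℕ) ≠ m.toNat)]
          omega
        rw [hsig]
        rw [Nat.cast_add, Nat.cast_one, Int.toNat_of_nonneg (by omega : (0:ℤ) ≤ m)]

theorem SOD_eq_alt (n : Int) (hn : 0 ≤ n) : SOD n = SOD_alt n := by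
  by_cases h2 : n < 2
  · interval_cases n <;> decide
  · rw [SOD_A_val n (by omega)]
    unfold SOD_alt
    rw [if_neg h2,
      sodOuter_spec (n + 1 - 2).toNat n 2 1 rfl (by omega) (by omega)
        (by intro d hd2 hdp; omega)]
    ring

-- ===== VERDICT (by name: the statement is the Claim_ definition above) =====
theorem SOD_spec : Claim_equal_SOD := by
  intro n _ hpre
  unfold Spec_SOD
  exact SOD_eq_alt n hpre

@[simp] theorem SOD_raises : Claim_raises_SOD := by
  unfold Claim_raises_SOD
  refine ⟨fun n _ hr hp => by unfold Raises_SOD at hr; unfold Pre_SOD at hp; omega,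
    by decide, by decide, by decide⟩
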